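-- pv_equiv track=rewrite | github.com/rowancape/ubongo3D_solver | main.py | rotateX
-- ===== SOURCE A (Python) =====
-- def rotateX(object, rotations=1):
--     rotations = rotations % 4
--
--     for _ in range(rotations):
--         layers = len(object)
--         rows = len(object[0])
--         points = len(object[0][0])
--
--         rotatedObject = [
--             [[object[j][rows - 1 - i][k] for k in range(points)] for j in range(layers)]
--             for i in range(rows)
--         ]
--         object = rotatedObject
--
--     return object
-- ===== SOURCE B (Python) =====
-- def rotateX(object, rotations=1):
--     k = rotations % 4
--     if k == 0:
--         return object
--     layers = len(object)
--     rows = len(object[0])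
--     points = len(object[0][0])
--     if k == 1:
--         return [[[object[j][rows - 1 - i][p] for p in range(points)]
--                  for j in range(layers)] for i in range(rows)]
--     if k == 2:
--         return [[[object[layers - 1 - i][rows - 1 - j][p] for p in range(points)]
--                  for j in range(rows)] for i in range(layers)]
--     return [[[object[layers - 1 - j][i][p] for p in range(points)]
--              for j in range(layers)] for i in range(rows)]
-- ===== Notes on version B (the rewrite author's own statement) =====
-- stated objective: alternative
-- what changed: B reduces k = rotations % 4 once and builds the result in a single pass from the composed index permutation for k (four direct formulas), instead of A's loop applying the 90-degree rotation k times and rebuilding the whole array each iteration.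
import Mathlib
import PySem

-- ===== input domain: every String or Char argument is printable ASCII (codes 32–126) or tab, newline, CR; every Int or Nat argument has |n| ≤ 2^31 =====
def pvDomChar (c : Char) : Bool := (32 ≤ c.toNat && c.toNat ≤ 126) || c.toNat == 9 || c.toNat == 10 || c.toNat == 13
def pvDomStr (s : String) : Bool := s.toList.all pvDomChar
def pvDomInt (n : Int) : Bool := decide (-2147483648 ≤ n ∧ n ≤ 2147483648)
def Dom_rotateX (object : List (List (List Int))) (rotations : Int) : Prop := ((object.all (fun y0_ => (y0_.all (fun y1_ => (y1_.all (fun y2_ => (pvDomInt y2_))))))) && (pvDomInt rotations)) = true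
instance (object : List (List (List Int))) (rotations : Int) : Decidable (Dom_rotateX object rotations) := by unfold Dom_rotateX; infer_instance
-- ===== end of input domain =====

-- B replaces A's loop of k successive 90° rotations by a single pass applying the
-- composed index permutation for k = rotations % 4 directly (objective: alternative/simpler).

-- ===== PORT A =====
-- object[j][i][k]; Pre_ guarantees every index used is in range, so the getD default is never read
def pvIdx3 (x : List (List (List Int))) (j i k : Nat) : Int :=
  ((x.getD j []).getD i []).getD k 0

-- one iteration of A's loop body
def pvRot90 (x : List (List (List Int))) : List (List (List Int)) :=
  let layers := x.length
  let rows := (x.headD []).length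
  let points := ((x.headD []).headD []).length
  (List.range rows).map (fun i =>
    (List.range layers).map (fun j =>
      (List.range points).map (fun k => pvIdx3 x j (rows - 1 - i) k)))

def rotateX (object : List (List (List Int))) (rotations : Int) : List (List (List Int)) :=
  let r := PySem.Int.mod rotations 4
  (PySem.List.pyRange 0 r 1).foldl (fun o _ => pvRot90 o) object

-- ===== PORT B =====
def pvIdx3b (x : List (List (List Int))) (j i k : Nat) : Int :=
  ((x.getD j []).getD i []).getD k 0

def rotateX_alt (object : List (List (List Int))) (rotations : Int) : List (List (List Int)) :=
  let k := PySem.Int.mod rotations 4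
  if k = 0 then object
  else
    let layers := object.length
    let rows := (object.headD []).length
    let points := ((object.headD []).headD []).length
    if k = 1 then
      (List.range rows).map (fun i =>
        (List.range layers).map (fun j =>
          (List.range points).map (fun p => pvIdx3b object j (rows - 1 - i) p)))
    else if k = 2 then
      (List.range layers).map (fun i =>
        (List.range rows).map (fun j =>
          (List.range points).map (fun p => pvIdx3b object (layers - 1 - i) (rows - 1 - j) p)))
    else
      (List.range rows).map (fun i =>
        (List.range layers).map (fun j =>
          (List.range points).map (fun p => pvIdx3b object (layers - 1 - j) i p)))

-- ===== PRECONDITION & SPEC =====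
-- Pre_ is exactly the set of inputs on which the Python A returns: when rotations % 4 ≠ 0 it
-- indexes object[0][0], each layer's first `rows` rows, and their first `points` entries
-- (unless points = 0, in which case the inner comprehension never indexes); everywhere else
-- A raises IndexError.
def Pre_rotateX (object : List (List (List Int))) (rotations : Int) : Prop :=
  PySem.Int.mod rotations 4 = 0 ∨
    (0 < object.length ∧ 0 < (object.headD []).length ∧
      (((object.headD []).headD []).length = 0 ∨
        ∀ l ∈ object, (object.headD []).length ≤ l.length ∧
          ∀ r ∈ l.take (object.headD []).length,
            ((object.headD []).headD []).length ≤ r.length))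
instance (object : List (List (List Int))) (rotations : Int) : Decidable (Pre_rotateX object rotations) := by unfold Pre_rotateX; infer_instance

def pvWitness_rotateX : List (List (List Int)) × Int := ([[[1, 2], [3, 4]], [[5, 6], [7, 8]]], 1)

def Spec_rotateX (object : List (List (List Int))) (rotations : Int) (out : List (List (List Int))) : Prop := out = rotateX_alt object rotations
instance (object : List (List (List Int))) (rotations : Int) (out : List (List (List Int))) : Decidable (Spec_rotateX object rotations out) := by unfold Spec_rotateX; infer_instance

-- ===== CLAIM (what is proved, stated in full; the proofs are below) =====
def Claim_equal_rotateX : Prop := ∀ (object : List (List (List Int))) (rotations : Int), Dom_rotateX object rotations → Pre_rotateX object rotations → Spec_rotateX object rotations (rotateX object rotations)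

-- ===== LEMMAS AND PROOFS =====

-- a rectangular L×R×P cuboid of values f i j k (proof-side normal form of both ports' outputs)
def mkCube (L R P : Nat) (f : Nat → Nat → Nat → Int) : List (List (List Int)) :=
  (List.range L).map (fun i =>
    (List.range R).map (fun j =>
      (List.range P).map (fun k => f i j k)))

lemma idx_cube {L R P : Nat} {f : Nat → Nat → Nat → Int} {a b c : Nat}
    (ha : a < L) (hb : b < R) (hc : c < P) :
    pvIdx3 (mkCube L R P f) a b c = f a b c := by
  simp [pvIdx3, mkCube, List.getD_eq_getElem?_getD, ha, hb, hc]

lemma mkCube_congr {L R P : Nat} {f g : Nat → Nat → Nat → Int}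
    (h : ∀ i < L, ∀ j < R, ∀ k < P, f i j k = g i j k) :
    mkCube L R P f = mkCube L R P g := by
  unfold mkCube
  refine List.map_congr_left (fun i hi => ?_)
  refine List.map_congr_left (fun j hj => ?_)
  refine List.map_congr_left (fun k hk => ?_)
  exact h i (List.mem_range.mp hi) j (List.mem_range.mp hj) k (List.mem_range.mp hk)

lemma rot90_cube {L R P : Nat} (f : Nat → Nat → Nat → Int) (hL : 0 < L) (hR : 0 < R) :
    pvRot90 (mkCube L R P f) = mkCube R L P (fun i j k => f j (R - 1 - i) k) := by
  obtain ⟨L', rfl⟩ : ∃ L', L = L' + 1 := ⟨L - 1, by omega⟩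
  obtain ⟨R', rfl⟩ : ∃ R', R = R' + 1 := ⟨R - 1, by omega⟩
  have hlen : (mkCube (L' + 1) (R' + 1) P f).length = L' + 1 := by simp [mkCube]
  have hhead : (mkCube (L' + 1) (R' + 1) P f).headD [] =
      (List.range (R' + 1)).map (fun j => (List.range P).map (fun k => f 0 j k)) := by
    simp [mkCube, List.range_succ_eq_map]
  show (List.range ((mkCube (L' + 1) (R' + 1) P f).headD []).length).map _ = _
  rw [hhead]
  simp only [List.length_map, List.length_range, hlen]
  have hh2 : ((List.range (R' + 1)).map
      (fun j => (List.range P).map (fun k => f 0 j k))).headD [] =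
      (List.range P).map (fun k => f 0 0 k) := by
    simp [List.range_succ_eq_map]
  rw [hh2]
  simp only [List.length_map, List.length_range]
  unfold mkCube
  refine List.map_congr_left (fun i hi => ?_)
  refine List.map_congr_left (fun j hj => ?_)
  refine List.map_congr_left (fun k hk => ?_)
  exact idx_cube (List.mem_range.mp hj) (by omega) (List.mem_range.mp hk)

lemma pvRot90_eq_cube (x : List (List (List Int))) :
    pvRot90 x = mkCube ((x.headD []).length) x.length (((x.headD []).headD []).length)
      (fun i j k => pvIdx3 x j ((x.headD []).length - 1 - i) k) := rfl

lemma pyRange_fold_one : PySem.List.pyRange 0 1 1 = [(0 : Int)] := by decide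
lemma pyRange_fold_two : PySem.List.pyRange 0 2 1 = [(0 : Int), 1] := by decide
lemma pyRange_fold_three : PySem.List.pyRange 0 3 1 = [(0 : Int), 1, 2] := by decide

-- ===== VERDICT (by name: the statement is the Claim_ definition above) =====
theorem rotateX_spec : Claim_equal_rotateX := by
  intro object rotations _dom hpre
  unfold Spec_rotateX
  have h4 : PySem.Int.mod rotations 4 = rotations % 4 :=
    PySem.Int.mod_eq_emod_of_pos (by norm_num)
  have hnn : 0 ≤ rotations % 4 := Int.emod_nonneg _ (by norm_num)
  have hlt : rotations % 4 < 4 := Int.emod_lt_of_pos _ (by norm_num)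
  have hcases : PySem.Int.mod rotations 4 = 0 ∨ PySem.Int.mod rotations 4 = 1 ∨
      PySem.Int.mod rotations 4 = 2 ∨ PySem.Int.mod rotations 4 = 3 := by
    rw [h4]; omega
  set L := object.length with hLdef
  set R := (object.headD []).length with hRdef
  set P := ((object.headD []).headD []).length with hPdef
  have hLR : PySem.Int.mod rotations 4 ≠ 0 → 0 < L ∧ 0 < R := by
    intro hne
    rcases hpre with h0 | h
    · exact absurd h0 hne
    · exact ⟨h.1, h.2.1⟩
  rcases hcases with hm | hm | hm | hm
  · -- k = 0 : both return object unchanged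
    have hr0 : PySem.List.pyRange 0 0 1 = ([] : List Int) := by decide
    show (PySem.List.pyRange 0 (PySem.Int.mod rotations 4) 1).foldl
        (fun o _ => pvRot90 o) object = rotateX_alt object rotations
    rw [hm, hr0]
    unfold rotateX_alt
    rw [hm]
    simp
  · -- k = 1
    obtain ⟨hL, hR⟩ := hLR (by rw [hm]; norm_num)
    show (PySem.List.pyRange 0 (PySem.Int.mod rotations 4) 1).foldl
        (fun o _ => pvRot90 o) object = rotateX_alt object rotations
    rw [hm, pyRange_fold_one]
    simp only [List.foldl_cons, List.foldl_nil]
    unfold rotateX_alt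
    rw [hm]
    with_unfolding_all rfl
  · -- k = 2
    obtain ⟨hL, hR⟩ := hLR (by rw [hm]; norm_num)
    show (PySem.List.pyRange 0 (PySem.Int.mod rotations 4) 1).foldl
        (fun o _ => pvRot90 o) object = rotateX_alt object rotations
    rw [hm, pyRange_fold_two]
    simp only [List.foldl_cons, List.foldl_nil]
    rw [pvRot90_eq_cube object, rot90_cube _ hR hL]
    unfold rotateX_alt
    rw [hm]
    with_unfolding_all rfl
  · -- k = 3
    obtain ⟨hL, hR⟩ := hLR (by rw [hm]; norm_num)
    show (PySem.List.pyRange 0 (PySem.Int.mod rotations 4) 1).foldl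
        (fun o _ => pvRot90 o) object = rotateX_alt object rotations
    rw [hm, pyRange_fold_three]
    simp only [List.foldl_cons, List.foldl_nil]
    rw [pvRot90_eq_cube object, rot90_cube _ hR hL, rot90_cube _ hL hR]
    have : (mkCube R L P fun i j k =>
        pvIdx3 object (L - 1 - j) (R - 1 - (R - 1 - i)) k) =
        mkCube R L P fun i j k => pvIdx3 object (L - 1 - j) i k := by
      refine mkCube_congr (fun i hi j hj k hk => ?_)
      congr 1
      omega
    rw [this]
    unfold rotateX_alt
    rw [hm]
    with_unfolding_all rfl
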